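-- pv_equiv track=rewrite | github.com/ninadiet/--- | scripts/utils/discord_notify.py | _get_embed_color
-- ===== SOURCE A (Python) =====
-- STATUS_COLOR = {
--     "running":  0xF0A500,   # オレンジ（実行中）
--     "done":     0x43B581,   # 緑（完了）
--     "pending":  0xFAA61A,   # 黄（承認待ち）
--     "error":    0xF04747,   # 赤（エラー）
--     "default":  0x7289DA,   # 青（デフォルト）
-- }
--
-- def _get_embed_color(statuses: dict) -> int:
--     """現在のパイプライン状態に応じた色を返す"""
--     values = [s for s, _ in statuses.values()]
--     if "error"   in values: return STATUS_COLOR["error"]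
--     if "running" in values: return STATUS_COLOR["running"]
--     if "pending" in values: return STATUS_COLOR["pending"]
--     all_done = all(s in ("done", "skipped") for s in values)
--     if all_done: return STATUS_COLOR["done"]
--     return STATUS_COLOR["default"]
-- ===== SOURCE B (Python) =====
-- STATUS_COLOR = {
--     "running":  0xF0A500,
--     "done":     0x43B581,
--     "pending":  0xFAA61A,
--     "error":    0xF04747,
--     "default":  0x7289DA,
-- }
--
-- def _get_embed_color(statuses: dict) -> int:
--     """One pass over the values accumulating flags instead of four list scans."""
--     has_error = has_running = has_pending = False
--     all_done = True
--     for s, _ in statuses.values():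
--         has_error = has_error or s == "error"
--         has_running = has_running or s == "running"
--         has_pending = has_pending or s == "pending"
--         all_done = all_done and s in ("done", "skipped")
--     if has_error:   return STATUS_COLOR["error"]
--     if has_running: return STATUS_COLOR["running"]
--     if has_pending: return STATUS_COLOR["pending"]
--     if all_done:    return STATUS_COLOR["done"]
--     return STATUS_COLOR["default"]
-- ===== Notes on version B (the rewrite author's own statement) =====
-- stated objective: alternative
-- what changed: Replaced A's materialised values list plus four separate scans (three membership tests and an all()) with a single fold over statuses.values() accumulating has_error/has_running/has_pending/all_done flags.
import Mathlib
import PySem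

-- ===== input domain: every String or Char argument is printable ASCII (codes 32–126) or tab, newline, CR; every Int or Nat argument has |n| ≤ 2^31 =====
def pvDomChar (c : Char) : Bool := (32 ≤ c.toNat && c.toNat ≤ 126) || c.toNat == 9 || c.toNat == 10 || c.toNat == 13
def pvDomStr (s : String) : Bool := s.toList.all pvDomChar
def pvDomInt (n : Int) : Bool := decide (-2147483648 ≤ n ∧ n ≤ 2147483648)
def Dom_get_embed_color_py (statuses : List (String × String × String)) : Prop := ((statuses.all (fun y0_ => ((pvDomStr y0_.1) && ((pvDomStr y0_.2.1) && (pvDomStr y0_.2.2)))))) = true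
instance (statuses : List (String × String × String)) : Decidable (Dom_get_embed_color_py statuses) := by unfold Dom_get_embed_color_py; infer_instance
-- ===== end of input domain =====

-- B replaces A's materialised values list and four separate scans by one fold
-- over the dict's values accumulating four flags; alternative decomposition, same cost.

-- ===== PORT A =====
-- STATUS_COLOR dict; keys used by the code are always present, getD's default is never read.
def statusColor : PySem.Dict String Int :=
  PySem.Dict.ofList [("running", 0xF0A500), ("done", 0x43B581), ("pending", 0xFAA61A),
                     ("error", 0xF04747), ("default", 0x7289DA)]

def get_embed_color_py (statuses : List (String × String × String)) : Int :=
  let values := ((PySem.Dict.ofList statuses).values).map (fun sv => sv.1)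
  if values.contains "error" then statusColor.getD "error" 0
  else if values.contains "running" then statusColor.getD "running" 0
  else if values.contains "pending" then statusColor.getD "pending" 0
  else
    let all_done := values.all (fun s => s == "done" || s == "skipped")
    if all_done then statusColor.getD "done" 0
    else statusColor.getD "default" 0

-- ===== PORT B =====
def get_embed_color_py_alt (statuses : List (String × String × String)) : Int :=
  let flags := ((PySem.Dict.ofList statuses).values).foldl
    (fun (acc : Bool × Bool × Bool × Bool) sv =>
      (acc.1 || sv.1 == "error", acc.2.1 || sv.1 == "running",
       acc.2.2.1 || sv.1 == "pending", acc.2.2.2 && (sv.1 == "done" || sv.1 == "skipped")))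
    (false, false, false, true)
  if flags.1 then statusColor.getD "error" 0
  else if flags.2.1 then statusColor.getD "running" 0
  else if flags.2.2.1 then statusColor.getD "pending" 0
  else if flags.2.2.2 then statusColor.getD "done" 0
  else statusColor.getD "default" 0

-- ===== PRECONDITION & SPEC =====
def Spec_get_embed_color_py (statuses : List (String × String × String)) (out : Int) : Prop := out = get_embed_color_py_alt statuses
instance (statuses : List (String × String × String)) (out : Int) : Decidable (Spec_get_embed_color_py statuses out) := by unfold Spec_get_embed_color_py; infer_instance

-- ===== CLAIM (what is proved, stated in full; the proofs are below) =====
def Claim_equal_get_embed_color_py : Prop := ∀ (statuses : List (String × String × String)), Dom_get_embed_color_py statuses → Spec_get_embed_color_py statuses (get_embed_color_py statuses)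

-- ===== LEMMAS AND PROOFS =====
-- B's fold computes exactly the four scan results A computes.
theorem flags_charac (l : List (String × String)) (e r p a : Bool) :
    l.foldl (fun (acc : Bool × Bool × Bool × Bool) sv =>
      (acc.1 || sv.1 == "error", acc.2.1 || sv.1 == "running",
       acc.2.2.1 || sv.1 == "pending", acc.2.2.2 && (sv.1 == "done" || sv.1 == "skipped")))
      (e, r, p, a)
    = (e || (l.map (fun sv => sv.1)).contains "error",
       r || (l.map (fun sv => sv.1)).contains "running",
       p || (l.map (fun sv => sv.1)).contains "pending",
       a && (l.map (fun sv => sv.1)).all (fun s => s == "done" || s == "skipped")) := by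
  induction l generalizing e r p a with
  | nil => simp
  | cons hd tl ih =>
    simp only [List.foldl_cons, List.map_cons, List.contains_cons, List.all_cons, ih]
    refine Prod.ext ?_ (Prod.ext ?_ (Prod.ext ?_ ?_)) <;> simp [BEq.comm, Bool.or_assoc, Bool.and_assoc]

-- ===== VERDICT (by name: the statement is the Claim_ definition above) =====
theorem get_embed_color_py_spec : Claim_equal_get_embed_color_py := by
  intro statuses _
  unfold Spec_get_embed_color_py get_embed_color_py get_embed_color_py_alt
  rw [flags_charac]
  simp only [Bool.false_or, Bool.true_and]
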